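-- pv_equiv track=rewrite | github.com/onfire7777/manus-skills-library | context-anchor/scripts/anchor.py | _insert_into_section
-- ===== SOURCE A (Python) =====
-- def _insert_into_section(content, section_header, new_item, numbered=False):
--     """Insert an item at the end of a markdown section, before the next ## heading.
--
--     Args:
--         content: Full document content
--         section_header: The ## header to find (e.g., "## Key Objectives")
--         new_item: The text to insert (without prefix)
--         numbered: If True, prefix with next number; if False, prefix with "- "
--
--     Returns:
--         Modified content string, or None if section not found
--     """
--     lines = content.split("\n")
--     new_lines = []
--     in_section = False
--     inserted = False
--     section_items = 0
--
--     for line in lines: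
--         if line.strip() == section_header:
--             in_section = True
--             new_lines.append(line)
--             continue
--
--         if in_section and not inserted:
--             if line.startswith("##"):
--                 # End of section — insert before next heading
--                 if numbered:
--                     new_lines.append(f"{section_items + 1}. {new_item}")
--                 else:
--                     new_lines.append(f"- {new_item}")
--                 new_lines.append("")
--                 new_lines.append(line)
--                 inserted = True
--                 in_section = False
--             else:
--                 new_lines.append(line)
--                 # Count items in this section only
--                 stripped = line.strip()
--                 if stripped:
--                     if numbered and stripped[0].isdigit() and ". " in stripped:
--                         section_items += 1
--                     elif not numbered and stripped.startswith("- "):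
--                         section_items += 1
--         else:
--             new_lines.append(line)
--
--     # If section was the last one (no subsequent ##)
--     if in_section and not inserted:
--         if numbered:
--             new_lines.append(f"{section_items + 1}. {new_item}")
--         else:
--             new_lines.append(f"- {new_item}")
--         new_lines.append("")
--
--     return "\n".join(new_lines)
-- ===== SOURCE B (Python) =====
-- def _insert_into_section(content, section_header, new_item, numbered=False):
--     """Insert an item at the end of a markdown section, before the next ## heading.
--
--     Index-based rewrite: locate the header line and the section's end boundary,
--     count items in the slice between them, then splice the new item in.
--     """
--     lines = content.split("\n")
--     hi = next((i for i, l in enumerate(lines) if l.strip() == section_header), None)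
--     if hi is None:
--         return "\n".join(lines)
--
--     def is_boundary(l):
--         return l.startswith("##") and l.strip() != section_header
--
--     def is_item(l):
--         s = l.strip()
--         if not s or s == section_header:
--             return False
--         if numbered:
--             return s[0].isdigit() and ". " in s
--         return s.startswith("- ")
--
--     j = next((k for k in range(hi + 1, len(lines)) if is_boundary(lines[k])),
--              len(lines))
--     count = sum(1 for l in lines[hi + 1:j] if is_item(l))
--     item = f"{count + 1}. {new_item}" if numbered else f"- {new_item}"
--     return "\n".join(lines[:j] + [item, ""] + lines[j:])
-- ===== Notes on version B (the rewrite author's own statement) =====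
-- stated objective: simpler
-- what changed: A's single stateful pass with in_section/inserted flags and an incremental item counter is replaced by an index-based decomposition: find the header line, find the next '##' boundary, count items in the slice between them, and splice the new item in with list slicing.
import Mathlib
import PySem

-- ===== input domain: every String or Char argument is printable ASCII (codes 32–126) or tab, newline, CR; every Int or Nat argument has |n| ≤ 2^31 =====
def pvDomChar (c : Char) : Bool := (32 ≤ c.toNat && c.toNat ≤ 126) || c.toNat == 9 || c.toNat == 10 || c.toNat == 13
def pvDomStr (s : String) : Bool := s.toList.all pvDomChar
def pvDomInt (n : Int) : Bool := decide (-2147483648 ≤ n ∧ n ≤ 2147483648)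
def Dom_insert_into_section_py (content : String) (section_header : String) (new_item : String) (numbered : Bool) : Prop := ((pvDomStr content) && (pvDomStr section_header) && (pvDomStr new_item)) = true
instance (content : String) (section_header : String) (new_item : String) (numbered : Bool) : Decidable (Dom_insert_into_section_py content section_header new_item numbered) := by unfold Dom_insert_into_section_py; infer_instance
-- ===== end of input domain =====

-- B replaces A's stateful in_section/inserted/count flag loop by an index-based
-- decomposition (find header, find boundary, count the slice, splice); objective: simpler.

-- ===== PORT A =====
-- A's count increment for one in-section line (the nested ifs of A's else-branch, verbatim).
def pvCountStep (numbered : Bool) (cnt : Int) (line : String) : Int :=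
  let stripped := PySem.Str.strip line
  if stripped == "" then cnt
  else if numbered && (match stripped.toList with
                        | c :: _ => PySem.Chars.isdigit c
                        | [] => false) && PySem.Str.isIn ". " stripped then cnt + 1
  else if !numbered && PySem.Str.startswith stripped "- " then cnt + 1
  else cnt

-- the new item line A builds (f"{n+1}. {new_item}" / f"- {new_item}")
def pvMkItem (new_item : String) (numbered : Bool) (cnt : Int) : String :=
  if numbered then PySem.Int.toStr (cnt + 1) ++ ". " ++ new_item else "- " ++ new_item

-- A's for-loop over the lines, state (in_section, inserted, section_items), plus the trailing
-- "if in_section and not inserted" block at the end of the list.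
def pvLoopA (section_header new_item : String) (numbered : Bool) :
    List String → Bool → Bool → Int → List String
  | [], inSec, inserted, cnt =>
      if inSec && !inserted then [pvMkItem new_item numbered cnt, ""] else []
  | line :: rest, inSec, inserted, cnt =>
      if PySem.Str.strip line == section_header then
        line :: pvLoopA section_header new_item numbered rest true inserted cnt
      else if inSec && !inserted then
        if PySem.Str.startswith line "##" then
          pvMkItem new_item numbered cnt :: "" :: line ::
            pvLoopA section_header new_item numbered rest false true cnt
        else
          line :: pvLoopA section_header new_item numbered rest inSec inserted
            (pvCountStep numbered cnt line)
      else
        line :: pvLoopA section_header new_item numbered rest inSec inserted cnt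

def insert_into_section_py (content : String) (section_header : String) (new_item : String) (numbered : Bool) : String :=
  let lines := (PySem.Str.split? content "\n").getD []   -- sep ≠ "" : always some
  PySem.Str.join "\n" (pvLoopA section_header new_item numbered lines false false 0)

-- ===== PORT B =====
def pvIsBoundary (section_header : String) (line : String) : Bool :=
  PySem.Str.startswith line "##" && !(PySem.Str.strip line == section_header)

def pvIsItem (section_header : String) (numbered : Bool) (line : String) : Bool :=
  let s := PySem.Str.strip line
  if s == "" || s == section_header then false
  else if numbered then (match s.toList with
                          | c :: _ => PySem.Chars.isdigit c
                          | [] => false) && PySem.Str.isIn ". " s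
  else PySem.Str.startswith s "- "

def insert_into_section_py_alt (content : String) (section_header : String) (new_item : String) (numbered : Bool) : String :=
  let lines := (PySem.Str.split? content "\n").getD []   -- sep ≠ "" : always some
  match lines.findIdx? (fun l => PySem.Str.strip l == section_header) with
  | none => PySem.Str.join "\n" lines
  | some hi =>
      let tl := lines.drop (hi + 1)
      let k := (tl.findIdx? (pvIsBoundary section_header)).getD tl.length
      let count : Int := (tl.take k).countP (pvIsItem section_header numbered)
      let item := if numbered then PySem.Int.toStr (count + 1) ++ ". " ++ new_item
                  else "- " ++ new_item
      PySem.Str.join "\n" (lines.take (hi + 1 + k) ++ [item, ""] ++ lines.drop (hi + 1 + k))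

-- ===== PRECONDITION & SPEC =====
def Spec_insert_into_section_py (content : String) (section_header : String) (new_item : String) (numbered : Bool) (out : String) : Prop := out = insert_into_section_py_alt content section_header new_item numbered
instance (content : String) (section_header : String) (new_item : String) (numbered : Bool) (out : String) : Decidable (Spec_insert_into_section_py content section_header new_item numbered out) := by unfold Spec_insert_into_section_py; infer_instance

-- ===== CLAIM (what is proved, stated in full; the proofs are below) =====
def Claim_equal_insert_into_section_py : Prop := ∀ (content : String) (section_header : String) (new_item : String) (numbered : Bool), Dom_insert_into_section_py content section_header new_item numbered → Spec_insert_into_section_py content section_header new_item numbered (insert_into_section_py content section_header new_item numbered)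

-- ===== LEMMAS AND PROOFS =====

-- once A has inserted the item, it only copies the remaining lines
theorem pvLoopA_inserted (h i : String) (numbered : Bool) :
    ∀ (rest : List String) (inSec : Bool) (cnt : Int),
      pvLoopA h i numbered rest inSec true cnt = rest := by
  intro rest
  induction rest with
  | nil => intro inSec cnt; simp [pvLoopA]
  | cons l rest ih =>
      intro inSec cnt
      by_cases h1 : (PySem.Str.strip l == h) = true
      · simp only [pvLoopA, h1, if_true]; rw [ih]
      · have h1' : (PySem.Str.strip l == h) = false := by simpa using h1
        simp only [pvLoopA, h1', Bool.false_eq_true, if_false, Bool.not_true, Bool.and_false]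
        rw [ih]

-- A's counting step agrees with B's item predicate on non-header lines
theorem pvCountStep_eq (h : String) (numbered : Bool) (cnt : Int) (l : String)
    (hne : (PySem.Str.strip l == h) = false) :
    pvCountStep numbered cnt l = cnt + (if pvIsItem h numbered l then 1 else 0) := by
  simp only [pvCountStep, pvIsItem]
  by_cases hs : (PySem.Str.strip l == "") = true
  · simp [hs, hne]
  · simp only [Bool.not_eq_true] at hs
    simp only [hs, hne, Bool.false_eq_true, if_false]
    cases numbered <;> split_ifs <;> simp_all

-- fold the "one more counted item" into the slice count
theorem pvCountArith (cnt : Int) (b : Bool) (c : Nat) :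
    cnt + (if b then (1:Int) else 0) + (c : Int) = cnt + ((c + if b then 1 else 0 : Nat) : Int) := by
  cases b <;> push_cast <;> ring

-- inside the open section A behaves like B's boundary/count decomposition
theorem pvLoopA_sec (h i : String) (numbered : Bool) :
    ∀ (rest : List String) (cnt : Int),
      pvLoopA h i numbered rest true false cnt =
        (let k := (rest.findIdx? (pvIsBoundary h)).getD rest.length
         rest.take k ++
           [pvMkItem i numbered (cnt + ((rest.take k).countP (pvIsItem h numbered) : Int)), ""] ++
           rest.drop k) := by
  intro rest
  induction rest with
  | nil => intro cnt; simp [pvLoopA]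
  | cons l rest ih =>
      intro cnt
      by_cases hH : (PySem.Str.strip l == h) = true
      · -- a repeated header line: not a boundary, not an item, stays in section
        have hB : pvIsBoundary h l = false := by simp [pvIsBoundary, hH]
        have hI : pvIsItem h numbered l = false := by
          have : PySem.Str.strip l = h := by simpa using hH
          simp [pvIsItem, this]
        simp only [pvLoopA, hH, if_true, List.findIdx?_cons, hB, Bool.false_eq_true, if_false,
          ih]
        cases hfind : rest.findIdx? (pvIsBoundary h) <;> simp [hI]
      · have hH' : (PySem.Str.strip l == h) = false := by simpa using hH
        by_cases hST : PySem.Str.startswith l "##" = true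
        · -- boundary line: A inserts the item, the blank, the boundary, then copies
          have hSTc : PySem.Chars.startswith l.toList ['#','#'] = true := by
            have e : "##".toList = ['#','#'] := rfl
            rw [PySem.Str.startswith_eq, e] at hST; exact hST
          have hB : pvIsBoundary h l = true := by simp [pvIsBoundary, hSTc, hH']
          simp [pvLoopA, hH', hSTc, hB, pvLoopA_inserted, List.findIdx?_cons]
        · -- ordinary in-section line: copied and counted
          have hST' : PySem.Str.startswith l "##" = false := by simpa using hST
          have hSTc : PySem.Chars.startswith l.toList ['#','#'] = false := by
            have e : "##".toList = ['#','#'] := rfl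
            rw [PySem.Str.startswith_eq, e] at hST'
            exact hST'
          have hB : pvIsBoundary h l = false := by simp [pvIsBoundary, hSTc]
          simp only [pvLoopA, hH', Bool.false_eq_true, if_false, Bool.and_self, Bool.not_false,
            if_true, hST', ih, List.findIdx?_cons, hB]
          rw [pvCountStep_eq h numbered cnt l hH']
          cases hfind : rest.findIdx? (pvIsBoundary h) <;>
            simp [List.countP_cons, pvCountArith]

-- the whole loop equals B's find-the-header decomposition
theorem pvLoopA_main (h i : String) (numbered : Bool) :
    ∀ (lines : List String),
      pvLoopA h i numbered lines false false 0 =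
        (match lines.findIdx? (fun l => PySem.Str.strip l == h) with
         | none => lines
         | some hi =>
             let tl := lines.drop (hi + 1)
             let k := (tl.findIdx? (pvIsBoundary h)).getD tl.length
             lines.take (hi + 1 + k) ++
               [pvMkItem i numbered ((tl.take k).countP (pvIsItem h numbered) : Int), ""] ++
               lines.drop (hi + 1 + k)) := by
  intro lines
  induction lines with
  | nil => simp [pvLoopA]
  | cons l rest ih =>
      by_cases hH : (PySem.Str.strip l == h) = true
      · simp only [pvLoopA, hH, if_true, List.findIdx?_cons]
        rw [pvLoopA_sec]
        simp only [List.drop_succ_cons, List.drop_zero]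
        cases hfind : rest.findIdx? (pvIsBoundary h) with
        | none => simp [zero_add, Nat.add_comm]
        | some k => simp [zero_add, Nat.add_comm]
      · have hH' : (PySem.Str.strip l == h) = false := by simpa using hH
        simp only [pvLoopA, hH', Bool.false_eq_true, if_false, Bool.false_and, Bool.not_false,
          ih, List.findIdx?_cons]
        cases hfind : rest.findIdx? (fun l => PySem.Str.strip l == h) with
        | none => simp
        | some hi =>
            simp only [Option.map_some, List.drop_succ_cons]
            generalize hk : ((rest.drop (hi + 1)).findIdx? (pvIsBoundary h)).getD
              (rest.drop (hi + 1)).length = k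
            rw [show hi + 1 + 1 + k = (hi + 1 + k) + 1 by omega]
            simp

-- ===== VERDICT (by name: the statement is the Claim_ definition above) =====
theorem insert_into_section_py_spec : Claim_equal_insert_into_section_py := by
  intro content section_header new_item numbered _
  unfold Spec_insert_into_section_py
  simp only [insert_into_section_py, insert_into_section_py_alt, pvLoopA_main]
  cases hfind : ((PySem.Str.split? content "\n").getD []).findIdx?
      (fun l => PySem.Str.strip l == section_header) with
  | none => simp
  | some hi => simp [pvMkItem]
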